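-- pv_equiv track=rewrite | github.com/lifeomic/phc-sdk-py | phc/easy/query/url.py | merge_pattern
-- ===== SOURCE A (Python) =====
-- from typing import Tuple
-- from functools import reduce
--
-- def merge_pattern(url_pattern: str, params: dict) -> Tuple[str, dict]:
--     def _reduce(pair, key):
--         temp_url, temp_params = pair
--
--         pattern = f"{{{key}}}"
--         if pattern in temp_url:
--             return (
--                 temp_url.replace(pattern, temp_params[key]),
--                 {k: v for k, v in temp_params.items() if k != key},
--             )
--
--         return pair
--
--     return reduce(_reduce, params.keys(), (url_pattern, params))
-- ===== SOURCE B (Python) =====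
-- from typing import Tuple
--
-- def merge_pattern(url_pattern: str, params: dict) -> Tuple[str, dict]:
--     # One pass: substitute into the url and build the remaining dict as we go,
--     # instead of rebuilding the whole params dict after every matched key.
--     url = url_pattern
--     remaining = {}
--     for key, value in params.items():
--         pattern = f"{{{key}}}"
--         if pattern in url:
--             url = url.replace(pattern, value)
--         else:
--             remaining[key] = value
--     return url, remaining
-- ===== Notes on version B (the rewrite author's own statement) =====
-- stated objective: simpler
-- what changed: B makes one pass that substitutes into the url and accumulates the unused (key, value) pairs directly, instead of A's reduce that rebuilds the entire params dict from scratch at every matched key.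
import Mathlib
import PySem

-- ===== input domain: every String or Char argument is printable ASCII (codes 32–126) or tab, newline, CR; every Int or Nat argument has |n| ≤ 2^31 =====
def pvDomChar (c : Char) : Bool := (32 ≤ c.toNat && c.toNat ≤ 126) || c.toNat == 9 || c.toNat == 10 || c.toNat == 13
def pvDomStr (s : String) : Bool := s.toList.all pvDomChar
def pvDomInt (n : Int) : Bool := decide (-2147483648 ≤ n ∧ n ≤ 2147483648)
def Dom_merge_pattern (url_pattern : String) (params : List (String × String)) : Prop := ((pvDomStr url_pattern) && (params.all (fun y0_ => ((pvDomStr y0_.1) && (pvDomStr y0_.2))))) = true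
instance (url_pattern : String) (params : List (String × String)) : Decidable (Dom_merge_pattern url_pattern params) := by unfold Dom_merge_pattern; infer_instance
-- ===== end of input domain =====

-- B replaces A's reduce (which rebuilds the whole params dict at every matched key) by one
-- plain pass that accumulates the unused pairs; same return value, proved equal below.

-- Shared input decoding: the association-list argument stands for a Python dict built with
-- first-binding-wins (the harness's setdefault loop); both ports read its items.
def dictItems (params : List (String × String)) : List (String × String) :=
  (params.foldl (fun d kv => d.setdefault kv.1 kv.2) PySem.Dict.empty).items

-- ===== PORT A =====
-- transliteration of A's reduce over params.keys(); the dict state is its items list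
-- (temp_params[key] is a first-match lookup; it provably never raises, so getD's default is dead).
def merge_pattern (url_pattern : String) (params : List (String × String)) : String × (List (String × String)) :=
  let items := dictItems params
  (items.map Prod.fst).foldl
    (fun pair key =>
      let pattern := "{" ++ key ++ "}"
      if PySem.Str.isIn pattern pair.1 then
        (PySem.Str.replace pair.1 pattern (((PySem.Dict.mk pair.2).get? key).getD ""),
         pair.2.filter (fun kv => !(kv.1 == key)))
      else pair)
    (url_pattern, items)

-- ===== PORT B =====
def merge_pattern_alt (url_pattern : String) (params : List (String × String)) : String × (List (String × String)) :=
  (dictItems params).foldl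
    (fun acc kv =>
      let pattern := "{" ++ kv.1 ++ "}"
      if PySem.Str.isIn pattern acc.1 then
        (PySem.Str.replace acc.1 pattern kv.2, acc.2)
      else (acc.1, acc.2 ++ [kv]))
    (url_pattern, ([] : List (String × String)))

-- ===== PRECONDITION & SPEC =====
def Spec_merge_pattern (url_pattern : String) (params : List (String × String)) (out : String × (List (String × String))) : Prop := out = merge_pattern_alt url_pattern params
instance (url_pattern : String) (params : List (String × String)) (out : String × (List (String × String))) : Decidable (Spec_merge_pattern url_pattern params out) := by unfold Spec_merge_pattern; infer_instance

-- ===== CLAIM (what is proved, stated in full; the proofs are below) =====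
def Claim_equal_merge_pattern : Prop := ∀ (url_pattern : String) (params : List (String × String)), Dom_merge_pattern url_pattern params → Spec_merge_pattern url_pattern params (merge_pattern url_pattern params)

-- ===== LEMMAS AND PROOFS =====

-- first-match lookup past a prefix that does not contain the key
theorem get?_mk_append_cons (done : List (String × String)) (k : String) (v : String)
    (t : List (String × String)) (h : k ∉ done.map Prod.fst) :
    (PySem.Dict.mk (done ++ (k, v) :: t)).get? k = some v := by
  induction done with
  | nil => simp [PySem.Dict.get?_mk_cons]
  | cons p ps ih =>
    obtain ⟨a, b⟩ := p
    simp only [List.map_cons, List.mem_cons, not_or] at h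
    rw [List.cons_append, PySem.Dict.get?_mk_cons]
    simp [Ne.symm h.1, ih h.2]

theorem filter_ne_key_eq_self (l : List (String × String)) (k : String)
    (h : k ∉ l.map Prod.fst) :
    l.filter (fun kv => !(kv.1 == k)) = l := by
  induction l with
  | nil => rfl
  | cons p ps ih =>
    simp only [List.map_cons, List.mem_cons, not_or] at h
    simp [Ne.symm h.1, ih h.2]

-- the loop invariant: A's fold over the remaining keys, with state dict = done ++ rest,
-- equals B's fold over rest started with the already-kept pairs done
theorem loop_eq (rest done : List (String × String)) (url : String)
    (hnd : ((done ++ rest).map Prod.fst).Nodup) :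
    (rest.map Prod.fst).foldl
      (fun pair key =>
        let pattern := "{" ++ key ++ "}"
        if PySem.Str.isIn pattern pair.1 then
          (PySem.Str.replace pair.1 pattern (((PySem.Dict.mk pair.2).get? key).getD ""),
           pair.2.filter (fun kv => !(kv.1 == key)))
        else pair)
      (url, done ++ rest)
    = ((rest.foldl
        (fun acc kv =>
          let pattern := "{" ++ kv.1 ++ "}"
          if PySem.Str.isIn pattern acc.1 then
            (PySem.Str.replace acc.1 pattern kv.2, acc.2)
          else (acc.1, acc.2 ++ [kv]))
        (url, done)).1,
       (rest.foldl
        (fun acc kv =>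
          let pattern := "{" ++ kv.1 ++ "}"
          if PySem.Str.isIn pattern acc.1 then
            (PySem.Str.replace acc.1 pattern kv.2, acc.2)
          else (acc.1, acc.2 ++ [kv]))
        (url, done)).2) := by
  induction rest generalizing done url with
  | nil => simp
  | cons kv rest ih =>
    obtain ⟨k, v⟩ := kv
    have hk_done : k ∉ done.map Prod.fst := by
      intro hm
      rcases List.mem_map.mp hm with ⟨⟨a, x⟩, hmem, ha⟩
      have hnd' := hnd
      simp [List.nodup_append] at hnd'
      exact (hnd'.2.2 a x hmem).1 ha
    have hk_rest : k ∉ rest.map Prod.fst := by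
      intro hm
      rcases List.mem_map.mp hm with ⟨⟨a, x⟩, hmem, ha⟩
      have hnd' := hnd
      simp [List.nodup_append] at hnd'
      exact hnd'.2.1.1 x (by rwa [show a = k from ha] at hmem)
    simp only [List.map_cons, List.foldl_cons]
    by_cases hin : PySem.Str.isIn ("{" ++ k ++ "}") url = true
    · -- matched: the value looked up is v, and the filter removes exactly (k, v)
      have hget : (PySem.Dict.mk (done ++ (k, v) :: rest)).get? k = some v :=
        get?_mk_append_cons done k v rest hk_done
      have hfil : (done ++ (k, v) :: rest).filter (fun kv => !(kv.1 == k)) = done ++ rest := by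
        rw [List.filter_append, filter_ne_key_eq_self done k hk_done]
        simp [filter_ne_key_eq_self rest k hk_rest]
      simp only [hin, if_true, hget, Option.getD_some, hfil]
      have hsub : ((done ++ rest).map Prod.fst).Sublist ((done ++ (k, v) :: rest).map Prod.fst) :=
        ((List.sublist_cons_self (k, v) rest).append_left done).map Prod.fst
      simpa using ih done (PySem.Str.replace url ("{" ++ k ++ "}") v) (hnd.sublist hsub)
    · -- no match: the pair is kept; it moves from the rest side to the done side
      simp only [hin]
      have h2 : (((done ++ [(k, v)]) ++ rest).map Prod.fst).Nodup := by
        rwa [List.append_assoc]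
      have := ih (done ++ [(k, v)]) url h2
      simpa using this

-- dictItems has pairwise-distinct keys (the setdefault fold never duplicates a key)
theorem nodup_keys_setdefault_foldl (l : List (String × String)) (d : PySem.Dict String String)
    (h : d.keys.Nodup) :
    ((l.foldl (fun d kv => d.setdefault kv.1 kv.2) d).keys).Nodup := by
  induction l generalizing d with
  | nil => exact h
  | cons kv l ih =>
    simp only [List.foldl_cons]
    apply ih
    rw [PySem.Dict.keys_setdefault]
    by_cases hc : d.contains kv.1 = true
    · simpa [hc] using h
    · have hk : kv.1 ∉ d.keys := by
        rw [PySem.Dict.contains_eq_decide_mem_keys] at hc; simpa using hc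
      simp [hc, List.nodup_append, h]
      exact fun a ha hb => hk (hb ▸ ha)

theorem nodup_dictItems (params : List (String × String)) :
    ((dictItems params).map Prod.fst).Nodup := by
  have := nodup_keys_setdefault_foldl params PySem.Dict.empty (by simp [PySem.Dict.empty])
  simpa [dictItems, PySem.Dict.keys] using this

-- ===== VERDICT (by name: the statement is the Claim_ definition above) =====
theorem merge_pattern_spec : Claim_equal_merge_pattern := by
  intro url_pattern params _
  unfold Spec_merge_pattern merge_pattern merge_pattern_alt
  have h := loop_eq (dictItems params) [] url_pattern (by simpa using nodup_dictItems params)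
  simpa using h
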